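-- pv_equiv track=rewrite | github.com/rivage-sh/clair | src/clair/docs/columns.py | _split_projection
-- ===== SOURCE A (Python) =====
-- def _split_projection(projection: str) -> list[str]:
--     """Split a SELECT projection into individual expressions.
--
--     Respects parentheses so that ``count(*)`` or ``coalesce(a, b)``
--     are not split on their internal commas.
--     """
--     expressions: list[str] = []
--     current_expression: list[str] = []
--     parenthesis_depth = 0
--
--     for character in projection:
--         if character == "(":
--             parenthesis_depth += 1
--             current_expression.append(character)
--         elif character == ")":
--             parenthesis_depth -= 1
--             current_expression.append(character)
--         elif character == "," and parenthesis_depth == 0: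
--             expressions.append("".join(current_expression))
--             current_expression = []
--         else:
--             current_expression.append(character)
--
--     # Don't forget the last expression
--     if current_expression:
--         expressions.append("".join(current_expression))
--
--     return expressions
-- ===== SOURCE B (Python) =====
-- def _split_projection(projection: str) -> list[str]:
--     """Split a SELECT projection into individual expressions.
--
--     Two passes: first record the index of every comma at parenthesis
--     depth 0, then rebuild the expressions by slicing the original
--     string between consecutive boundaries.
--     """
--     cuts: list[int] = []
--     depth = 0
--     for index, character in enumerate(projection):
--         if character == "(":
--             depth += 1
--         elif character == ")":
--             depth -= 1
--         elif character == "," and depth == 0: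
--             cuts.append(index)
--     expressions: list[str] = []
--     start = 0
--     for cut in cuts:
--         expressions.append(projection[start:cut])
--         start = cut + 1
--     if start < len(projection):
--         expressions.append(projection[start:])
--     return expressions
-- ===== Notes on version B (the rewrite author's own statement) =====
-- stated objective: alternative
-- what changed: A accumulates characters of the current expression while scanning; B makes two passes: a depth-tracking scan that only records the indices of top-level commas, then a slicing pass that rebuilds each expression from the original string between consecutive boundaries.
import Mathlib
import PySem

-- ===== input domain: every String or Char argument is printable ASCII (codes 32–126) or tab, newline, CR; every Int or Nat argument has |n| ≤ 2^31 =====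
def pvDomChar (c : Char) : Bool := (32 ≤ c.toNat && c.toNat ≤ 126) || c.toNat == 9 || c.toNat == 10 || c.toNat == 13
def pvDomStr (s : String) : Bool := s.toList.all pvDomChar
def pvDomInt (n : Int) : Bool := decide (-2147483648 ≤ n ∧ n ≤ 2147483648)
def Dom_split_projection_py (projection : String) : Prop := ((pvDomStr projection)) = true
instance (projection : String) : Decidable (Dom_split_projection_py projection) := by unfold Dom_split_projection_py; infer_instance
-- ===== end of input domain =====

-- B replaces A's character-accumulator loop by two passes — record the indices of the
-- top-level commas, then rebuild the pieces by slicing the original string (objective: alternative).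

-- ===== PORT A =====
-- A's for-loop: state (expressions, current_expression, parenthesis_depth)
def pvAloop (cs : List Char) (exprs : List String) (cur : List Char) (depth : Int) :
    List String × List Char :=
  match cs with
  | [] => (exprs, cur)
  | c :: rest =>
    if c = '(' then pvAloop rest exprs (cur ++ [c]) (depth + 1)
    else if c = ')' then pvAloop rest exprs (cur ++ [c]) (depth - 1)
    else if c = ',' ∧ depth = 0 then pvAloop rest (exprs ++ [String.ofList cur]) [] depth
    else pvAloop rest exprs (cur ++ [c]) depth

def split_projection_py (projection : String) : List String :=
  match pvAloop projection.toList [] [] 0 with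
  | (exprs, cur) => if cur ≠ [] then exprs ++ [String.ofList cur] else exprs

-- ===== PORT B =====
-- B's first pass: 'for index, character in enumerate(projection)' collecting top-level comma indices
def pvBcuts (cs : List Char) (index : Nat) (depth : Int) (cuts : List Nat) : List Nat :=
  match cs with
  | [] => cuts
  | c :: rest =>
    if c = '(' then pvBcuts rest (index + 1) (depth + 1) cuts
    else if c = ')' then pvBcuts rest (index + 1) (depth - 1) cuts
    else if c = ',' ∧ depth = 0 then pvBcuts rest (index + 1) depth (cuts ++ [index])
    else pvBcuts rest (index + 1) depth cuts

-- B's second pass: 'for cut in cuts: expressions.append(projection[start:cut]); start = cut + 1'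
def pvBslices (projection : String) (cuts : List Nat) (start : Nat) (acc : List String) :
    List String × Nat :=
  match cuts with
  | [] => (acc, start)
  | cut :: rest =>
      pvBslices projection rest (cut + 1)
        (acc ++ [PySem.Str.slice projection (some (start : Int)) (some (cut : Int))])

def split_projection_py_alt (projection : String) : List String :=
  match pvBslices projection (pvBcuts projection.toList 0 0 []) 0 [] with
  | (acc, start) =>
      if (start : Int) < PySem.Str.len projection then
        acc ++ [PySem.Str.slice projection (some (start : Int)) none]
      else acc

-- ===== PRECONDITION & SPEC =====
def Spec_split_projection_py (projection : String) (out : List String) : Prop := out = split_projection_py_alt projection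
instance (projection : String) (out : List String) : Decidable (Spec_split_projection_py projection out) := by unfold Spec_split_projection_py; infer_instance

-- ===== CLAIM (what is proved, stated in full; the proofs are below) =====
def Claim_equal_split_projection_py : Prop := ∀ (projection : String), Dom_split_projection_py projection → Spec_split_projection_py projection (split_projection_py projection)

-- ===== LEMMAS AND PROOFS =====

-- pvBcuts with accumulator `cuts` only appends to it
lemma pvBcuts_acc (cs : List Char) : ∀ (i : Nat) (d : Int) (cuts : List Nat),
    pvBcuts cs i d cuts = cuts ++ pvBcuts cs i d [] := by
  induction cs with
  | nil => intro i d cuts; simp [pvBcuts]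
  | cons c rest ih =>
    intro i d cuts
    simp only [pvBcuts]
    split_ifs with h1 h2 h3
    · exact ih _ _ _
    · exact ih _ _ _
    · rw [ih _ _ (cuts ++ [i]), ih _ _ ([] ++ [i])]; simp
    · exact ih _ _ _

-- a slice of the original string as B takes it, written as drop/take
lemma pvSlice_eq (p : String) (s i : Nat) :
    PySem.Str.slice p (some (s : Int)) (some (i : Int)) =
      String.ofList ((p.toList.drop s).take (i - s)) := by
  apply String.toList_injective
  simp [PySem.Str.toList_slice, PySem.Chars.slice_eq_listSlice, PySem.List.slice_natCast]

lemma pvSliceFrom_eq (p : String) (s : Nat) :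
    PySem.Str.slice p (some (s : Int)) none = String.ofList (p.toList.drop s) := by
  apply String.toList_injective
  simp [PySem.Str.toList_slice, PySem.Chars.slice_eq_listSlice, PySem.List.slice_from_natCast]

-- extending A's current_expression by one character is extending the take window
lemma pvTake_snoc (l : List Char) (s i : Nat) (c : Char) (rest : List Char)
    (h : l.drop i = c :: rest) (hs : s ≤ i) :
    (l.drop s).take (i - s) ++ [c] = (l.drop s).take (i + 1 - s) := by
  have hi : l[i]? = some c := by
    have := @List.getElem?_drop _ l i 0
    simpa [h] using this.symm
  have h2 : (l.drop s)[i - s]? = some c := by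
    rw [List.getElem?_drop]
    rwa [Nat.add_sub_cancel' hs]
  rw [show i + 1 - s = (i - s) + 1 by omega, List.take_add_one, h2]
  rfl

-- the core invariant: A's loop-and-finish equals B's cuts-then-slices-and-finish
lemma pv_main (p : String) : ∀ (rest : List Char) (i s : Nat) (depth : Int) (exprs : List String),
    rest = p.toList.drop i → s ≤ i →
    (match pvAloop rest exprs ((p.toList.drop s).take (i - s)) depth with
     | (e, cur) => if cur ≠ [] then e ++ [String.ofList cur] else e)
    = (match pvBslices p (pvBcuts rest i depth []) s exprs with
       | (acc, start) =>
          if (start : Int) < PySem.Str.len p then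
            acc ++ [PySem.Str.slice p (some (start : Int)) none]
          else acc) := by
  intro rest
  induction rest with
  | nil =>
    intro i s depth exprs hrest hs
    have hpl : p.toList.length = p.length := String.length_toList
    have hlen : p.toList.length ≤ i := by
      have := congrArg List.length hrest
      simp at this
      omega
    have hcur : (p.toList.drop s).take (i - s) = p.toList.drop s := by
      apply List.take_of_length_le
      simp; omega
    simp only [pvAloop, pvBcuts, pvBslices, hcur, PySem.Str.len_eq]
    by_cases hns : s < p.toList.length
    · have hne : p.toList.drop s ≠ [] := by
        simp [List.drop_eq_nil_iff]; omega
      rw [if_pos hne, if_pos (by omega), pvSliceFrom_eq]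
    · have he : p.toList.drop s = [] := by
        simp [List.drop_eq_nil_iff]; omega
      rw [if_neg (by simp [he]), if_neg (by omega)]
  | cons c rest ih =>
    intro i s depth exprs hrest hs
    have hdrop : p.toList.drop (i + 1) = rest := by
      have := congrArg List.tail hrest
      simpa [List.tail_drop] using this.symm
    have hsnoc : (p.toList.drop s).take (i - s) ++ [c] = (p.toList.drop s).take (i + 1 - s) :=
      pvTake_snoc _ _ _ _ _ hrest.symm hs
    simp only [pvAloop, pvBcuts]
    by_cases h1 : c = '('
    · simp only [← h1]
      rw [hsnoc]
      exact ih (i + 1) s (depth + 1) exprs hdrop.symm (by omega)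
    · by_cases h2 : c = ')'
      · simp only [if_neg h1, ← h2]
        rw [hsnoc]
        exact ih (i + 1) s (depth - 1) exprs hdrop.symm (by omega)
      · by_cases h3 : c = ',' ∧ depth = 0
        · simp only [if_neg h1, if_neg h2, if_pos h3, List.nil_append]
          rw [pvBcuts_acc rest (i + 1) depth [i],
              show [i] ++ pvBcuts rest (i + 1) depth [] = i :: pvBcuts rest (i + 1) depth []
                from rfl]
          simp only [pvBslices, pvSlice_eq]
          have := ih (i + 1) (i + 1) depth
            (exprs ++ [String.ofList ((p.toList.drop s).take (i - s))]) hdrop.symm (le_refl _)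
          simpa using this
        · simp only [if_neg h1, if_neg h2, if_neg h3]
          rw [hsnoc]
          exact ih (i + 1) s depth exprs hdrop.symm (by omega)

-- ===== VERDICT (by name: the statement is the Claim_ definition above) =====
theorem split_projection_py_spec : Claim_equal_split_projection_py := by
  intro p _
  unfold Spec_split_projection_py split_projection_py split_projection_py_alt
  have h := pv_main p p.toList 0 0 0 [] (by simp) (le_refl 0)
  simpa using h
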